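-- pv_equiv track=rewrite | github.com/Seol-Munhyeok/Problem-Solving-Archive | 프로그래머스/lv2/72412. 순위 검색/순위 검색.py | make_keys
-- ===== SOURCE A (Python) =====
-- def make_keys(field):
--     # 입력된 필드에 대해서 '-'가 포함된 모든 경우를 keys에 저장
--     keys = []
--     lang, pos, career, food = field
--     for a in [lang, '-']:
--         for b in [pos, '-']:
--             for c in [career, '-']:
--                 for d in [food, '-']:
--                     keys.append((a, b, c, d))
--
--     return keys
-- ===== SOURCE B (Python) =====
-- def make_keys(field):
--     # Staged Cartesian product: start from the empty key and extend each
--     # partial key with (value, '-') for every field, one pass per field.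
--     combos = [()]
--     for value in field:
--         combos = [key + (opt,) for key in combos for opt in (value, '-')]
--     return combos
-- ===== Notes on version B (the rewrite author's own statement) =====
-- stated objective: simpler
-- what changed: Replaces the four nested loops over named fields with a generic staged Cartesian-product build: one pass per field extends every partial key with (value, '-'), growing the key list 1->2->4->8->16.
import Mathlib
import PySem

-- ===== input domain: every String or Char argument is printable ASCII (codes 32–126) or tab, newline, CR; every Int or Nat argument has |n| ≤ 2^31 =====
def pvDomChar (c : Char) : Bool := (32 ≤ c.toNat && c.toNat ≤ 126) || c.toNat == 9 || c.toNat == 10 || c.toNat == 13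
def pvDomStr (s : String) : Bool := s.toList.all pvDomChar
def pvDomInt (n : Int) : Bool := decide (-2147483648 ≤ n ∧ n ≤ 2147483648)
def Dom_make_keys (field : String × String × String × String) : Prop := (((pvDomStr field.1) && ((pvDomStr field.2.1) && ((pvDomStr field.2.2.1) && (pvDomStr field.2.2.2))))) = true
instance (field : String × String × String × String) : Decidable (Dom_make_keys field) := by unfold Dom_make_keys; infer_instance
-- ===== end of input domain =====

-- ===== PORT A =====
-- B replaces A's four nested loops with a generic staged Cartesian-product build (one extension pass per field); same cost, simpler decomposition.
def make_keys (field : String × String × String × String) : List (String × String × String × String) :=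
  let lang := field.1; let pos := field.2.1; let career := field.2.2.1; let food := field.2.2.2
  ([lang, "-"]).foldl (fun keys a =>
    ([pos, "-"]).foldl (fun keys b =>
      ([career, "-"]).foldl (fun keys c =>
        ([food, "-"]).foldl (fun keys d =>
          keys ++ [(a, b, c, d)]) keys) keys) keys) []

-- ===== PORT B =====
-- Python grows tuples by concatenation; here a partial key is a List String,
-- converted to the 4-tuple at the end (the match default is unreachable: every
-- final key has exactly 4 components).
def make_keys_alt (field : String × String × String × String) : List (String × String × String × String) :=
  let combos := ([field.1, field.2.1, field.2.2.1, field.2.2.2]).foldl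
    (fun combos value =>
      combos.flatMap (fun key => ([value, "-"]).map (fun opt => key ++ [opt])))
    [([] : List String)]
  combos.map (fun k => match k with
    | [a, b, c, d] => (a, b, c, d)
    | _ => ("", "", "", ""))

-- ===== PRECONDITION & SPEC =====
def Spec_make_keys (field : String × String × String × String) (out : List (String × String × String × String)) : Prop := out = make_keys_alt field
instance (field : String × String × String × String) (out : List (String × String × String × String)) : Decidable (Spec_make_keys field out) := by unfold Spec_make_keys; infer_instance

-- ===== CLAIM (what is proved, stated in full; the proofs are below) =====
def Claim_equal_make_keys : Prop := ∀ (field : String × String × String × String), Dom_make_keys field → Spec_make_keys field (make_keys field)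

-- ===== LEMMAS AND PROOFS =====

-- ===== VERDICT (by name: the statement is the Claim_ definition above) =====
theorem make_keys_spec : Claim_equal_make_keys := by
  intro field _
  unfold Spec_make_keys make_keys make_keys_alt
  obtain ⟨lang, pos, career, food⟩ := field
  simp [List.foldl, List.flatMap, List.map]
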